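-- pv_equiv track=rewrite | github.com/hengniu2/Bedrock_Example | planner/app.py | _choose_preview_html
-- ===== SOURCE A (Python) =====
-- from typing import Any, Dict, List, Optional, Tuple
--
-- def _tsx_wrapper(tsx_filename: str, tsx_code: str) -> str:
--     return f"""<!doctype html>
-- <html><head>
-- <meta charset="utf-8"/><meta name="viewport" content="width=device-width,initial-scale=1"/>
-- <title>{tsx_filename} preview</title>
-- <style>html,body,#root{{height:100%;margin:0}}*,*:before,*:after{{box-sizing:border-box}}</style>
-- <script crossorigin src="https://unpkg.com/react@18/umd/react.development.js"></script>
-- <script crossorigin src="https://unpkg.com/react-dom@18/umd/react-dom.development.js"></script>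
-- <script src="https://unpkg.com/@babel/standalone/babel.min.js"></script>
-- </head>
-- <body><div id="root"></div>
-- <script type="text/babel" data-presets="typescript,react">
-- {tsx_code}
-- try {{
--   const C = (typeof RootLayout!=='undefined'&&RootLayout) || (typeof App!=='undefined'&&App) || (typeof Layout!=='undefined'&&Layout);
--   if (!C) throw new Error('No RootLayout/App/Layout export found to mount.');
--   ReactDOM.createRoot(document.getElementById('root')).render(React.createElement(C, {{}}));
-- }} catch (e) {{
--   const pre = document.createElement('pre'); pre.textContent = 'Preview error:\\n' + String(e);
--   document.body.appendChild(pre);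
-- }}
-- </script></body></html>"""
--
-- def _choose_preview_html(files: List[Dict[str, str]]) -> str:
--     for f in files:
--         p = (f.get("path") or "").lower()
--         if p.endswith("index.html"):
--             return f.get("contents", "")
--     for f in files:
--         name = (f.get("path") or "").split("/")[-1]
--         if name in {"layout.tsx", "app.tsx", "App.tsx", "index.tsx"} or name.lower().endswith(".tsx"):
--             return _tsx_wrapper(f.get("path", ""), f.get("contents", ""))
--     for f in files:
--         if (f.get("path") or "").lower().endswith(".html"):
--             return f.get("contents", "")
--     if files:
--         first = files[0]
--         return f"<pre>{first.get('path','(no path)')}\\n\\n{first.get('contents','')}</pre>"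
--     return "<p>(no content)</p>"
-- ===== SOURCE B (Python) =====
-- from typing import Dict, List
--
-- def _tsx_wrapper(tsx_filename: str, tsx_code: str) -> str:
--     return f"""<!doctype html>
-- <html><head>
-- <meta charset="utf-8"/><meta name="viewport" content="width=device-width,initial-scale=1"/>
-- <title>{tsx_filename} preview</title>
-- <style>html,body,#root{{height:100%;margin:0}}*,*:before,*:after{{box-sizing:border-box}}</style>
-- <script crossorigin src="https://unpkg.com/react@18/umd/react.development.js"></script>
-- <script crossorigin src="https://unpkg.com/react-dom@18/umd/react-dom.development.js"></script>
-- <script src="https://unpkg.com/@babel/standalone/babel.min.js"></script>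
-- </head>
-- <body><div id="root"></div>
-- <script type="text/babel" data-presets="typescript,react">
-- {tsx_code}
-- try {{
--   const C = (typeof RootLayout!=='undefined'&&RootLayout) || (typeof App!=='undefined'&&App) || (typeof Layout!=='undefined'&&Layout);
--   if (!C) throw new Error('No RootLayout/App/Layout export found to mount.');
--   ReactDOM.createRoot(document.getElementById('root')).render(React.createElement(C, {{}}));
-- }} catch (e) {{
--   const pre = document.createElement('pre'); pre.textContent = 'Preview error:\\n' + String(e);
--   document.body.appendChild(pre);
-- }}
-- </script></body></html>"""
--
-- def _choose_preview_html(files: List[Dict[str, str]]) -> str: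
--     # single pass: four first-seen slots instead of four sequential scans
--     idx_html = tsx_file = any_html = first = None
--     for f in files:
--         path = f.get("path") or ""
--         low = path.lower()
--         if first is None:
--             first = f
--         if idx_html is None and low.endswith("index.html"):
--             idx_html = f.get("contents", "")
--         if tsx_file is None and path.split("/")[-1].lower().endswith(".tsx"):
--             tsx_file = (f.get("path", ""), f.get("contents", ""))
--         if any_html is None and low.endswith(".html"):
--             any_html = f.get("contents", "")
--     if idx_html is not None:
--         return idx_html
--     if tsx_file is not None:
--         return _tsx_wrapper(*tsx_file)
--     if any_html is not None:
--         return any_html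
--     if first is not None:
--         return f"<pre>{first.get('path','(no path)')}\\n\\n{first.get('contents','')}</pre>"
--     return "<p>(no content)</p>"
-- ===== Notes on version B (the rewrite author's own statement) =====
-- stated objective: alternative
-- what changed: Replaces A's four sequential early-return scans over files with a single pass that maintains four first-seen slots (index.html contents, tsx file, any .html contents, first file) and picks by priority afterwards; the tsx slot drops A's redundant literal-name set, which the lowered '.tsx' suffix test already subsumes.
import Mathlib
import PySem

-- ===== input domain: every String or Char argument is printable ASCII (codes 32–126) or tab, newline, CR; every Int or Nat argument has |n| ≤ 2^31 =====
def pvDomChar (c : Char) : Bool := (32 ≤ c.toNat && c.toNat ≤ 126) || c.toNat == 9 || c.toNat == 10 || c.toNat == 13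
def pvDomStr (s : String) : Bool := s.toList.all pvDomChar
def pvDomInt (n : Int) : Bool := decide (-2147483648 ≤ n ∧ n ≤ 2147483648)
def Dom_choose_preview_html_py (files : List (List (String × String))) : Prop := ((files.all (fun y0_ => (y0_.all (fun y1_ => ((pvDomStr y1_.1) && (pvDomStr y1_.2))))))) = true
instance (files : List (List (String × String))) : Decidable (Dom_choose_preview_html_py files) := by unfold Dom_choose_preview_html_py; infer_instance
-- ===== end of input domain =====

-- B replaces A's four sequential early-return scans by one pass keeping four first-seen slots (objective: alternative decomposition; same cost).

-- ===== PORT A =====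
-- shared string-building helpers (used verbatim by both ports)
def tsxPre : String := "<!doctype html>\n<html><head>\n<meta charset=\"utf-8\"/><meta name=\"viewport\" content=\"width=device-width,initial-scale=1\"/>\n<title>"
def tsxMid : String := " preview</title>\n<style>html,body,#root{height:100%;margin:0}*,*:before,*:after{box-sizing:border-box}</style>\n<script crossorigin src=\"https://unpkg.com/react@18/umd/react.development.js\"></script>\n<script crossorigin src=\"https://unpkg.com/react-dom@18/umd/react-dom.development.js\"></script>\n<script src=\"https://unpkg.com/@babel/standalone/babel.min.js\"></script>\n</head>\n<body><div id=\"root\"></div>\n<script type=\"text/babel\" data-presets=\"typescript,react\">\n"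
def tsxPost : String := "\ntry {\n  const C = (typeof RootLayout!=='undefined'&&RootLayout) || (typeof App!=='undefined'&&App) || (typeof Layout!=='undefined'&&Layout);\n  if (!C) throw new Error('No RootLayout/App/Layout export found to mount.');\n  ReactDOM.createRoot(document.getElementById('root')).render(React.createElement(C, {}));\n} catch (e) {\n  const pre = document.createElement('pre'); pre.textContent = 'Preview error:\\n' + String(e);\n  document.body.appendChild(pre);\n}\n</script></body></html>"

-- f.get(k, d); also models `f.get("path") or ""` with d = "" (all values are strings, so only a missing key / "" is falsy)
def pvGetD (f : List (String × String)) (k d : String) : String :=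
  match f.find? (fun p => p.1 == k) with
  | some p => p.2
  | none => d

def tsxWrapper (fn code : String) : String := tsxPre ++ fn ++ tsxMid ++ code ++ tsxPost

-- p.split("/")[-1]; split with a non-empty separator is never empty, so [-1] never raises and .getD "" is exact
def baseName (p : String) : String :=
  match PySem.Str.split? p "/" with
  | some parts => (PySem.List.pyGet? parts (-1)).getD ""
  | none => ""  -- unreachable: the separator "/" is non-empty

def preFallback (first : List (String × String)) : String :=
  "<pre>" ++ pvGetD first "path" "(no path)" ++ "\\n\\n" ++ pvGetD first "contents" "" ++ "</pre>"

-- first for-loop of A: return contents of first path ending (lowered) with "index.html"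
def loopIndex : List (List (String × String)) → Option String
  | [] => none
  | f :: rest =>
    if PySem.Str.endswith (PySem.Str.lower (pvGetD f "path" "")) "index.html" then
      some (pvGetD f "contents" "")
    else loopIndex rest

-- second for-loop of A: first tsx-named file, wrapped
def loopTsx : List (List (String × String)) → Option String
  | [] => none
  | f :: rest =>
    let name := baseName (pvGetD f "path" "")
    if name == "layout.tsx" || name == "app.tsx" || name == "App.tsx" || name == "index.tsx"
        || PySem.Str.endswith (PySem.Str.lower name) ".tsx" then
      some (tsxWrapper (pvGetD f "path" "") (pvGetD f "contents" ""))
    else loopTsx rest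

-- third for-loop of A: contents of first path ending (lowered) with ".html"
def loopHtml : List (List (String × String)) → Option String
  | [] => none
  | f :: rest =>
    if PySem.Str.endswith (PySem.Str.lower (pvGetD f "path" "")) ".html" then
      some (pvGetD f "contents" "")
    else loopHtml rest

def choose_preview_html_py (files : List (List (String × String))) : String :=
  match loopIndex files with
  | some c => c
  | none =>
    match loopTsx files with
    | some h => h
    | none =>
      match loopHtml files with
      | some c => c
      | none =>
        match files with
        | first :: _ => preFallback first
        | [] => "<p>(no content)</p>"

-- ===== PORT B =====
-- one loop step: fill each of the four slots only if still empty (first-seen wins)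
def altStep (s : Option String × Option (String × String) × Option String × Option (List (String × String)))
    (f : List (String × String)) :
    Option String × Option (String × String) × Option String × Option (List (String × String)) :=
  match s with
  | (idx, tsx, anyh, first) =>
    let path := pvGetD f "path" ""
    let low := PySem.Str.lower path
    let first' := match first with | some x => some x | none => some f
    let idx' := match idx with
      | some x => some x
      | none => if PySem.Str.endswith low "index.html" then some (pvGetD f "contents" "") else none
    let tsx' := match tsx with
      | some x => some x
      | none =>
        if PySem.Str.endswith (PySem.Str.lower (baseName path)) ".tsx" then
          some (pvGetD f "path" "", pvGetD f "contents" "")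
        else none
    let anyh' := match anyh with
      | some x => some x
      | none => if PySem.Str.endswith low ".html" then some (pvGetD f "contents" "") else none
    (idx', tsx', anyh', first')

def choose_preview_html_py_alt (files : List (List (String × String))) : String :=
  match files.foldl altStep (none, none, none, none) with
  | (idx, tsx, anyh, first) =>
    match idx with
    | some c => c
    | none =>
      match tsx with
      | some pc => tsxWrapper pc.1 pc.2
      | none =>
        match anyh with
        | some c => c
        | none =>
          match first with
          | some f => preFallback f
          | none => "<p>(no content)</p>"

-- ===== PRECONDITION & SPEC =====
def Spec_choose_preview_html_py (files : List (List (String × String))) (out : String) : Prop := out = choose_preview_html_py_alt files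
instance (files : List (List (String × String))) (out : String) : Decidable (Spec_choose_preview_html_py files out) := by unfold Spec_choose_preview_html_py; infer_instance

-- ===== CLAIM (what is proved, stated in full; the proofs are below) =====
def Claim_equal_choose_preview_html_py : Prop := ∀ (files : List (List (String × String))), Dom_choose_preview_html_py files → Spec_choose_preview_html_py files (choose_preview_html_py files)

-- ===== LEMMAS AND PROOFS =====
-- B-side first match for the tsx slot (lowered basename ends with ".tsx"), as a plain recursion
def findTsxB : List (List (String × String)) → Option (String × String)
  | [] => none
  | f :: rest =>
    if PySem.Str.endswith (PySem.Str.lower (baseName (pvGetD f "path" ""))) ".tsx" then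
      some (pvGetD f "path" "", pvGetD f "contents" "")
    else findTsxB rest

-- membership in A's literal tsx-name set is subsumed by the lowered ".tsx"-suffix test
theorem tsx_pred_eq (name : String) :
    (name == "layout.tsx" || name == "app.tsx" || name == "App.tsx" || name == "index.tsx"
      || PySem.Str.endswith (PySem.Str.lower name) ".tsx")
      = PySem.Str.endswith (PySem.Str.lower name) ".tsx" := by
  rcases eq_or_ne name "layout.tsx" with h1 | h1
  · subst h1; decide
  rcases eq_or_ne name "app.tsx" with h2 | h2
  · subst h2; decide
  rcases eq_or_ne name "App.tsx" with h3 | h3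
  · subst h3; decide
  rcases eq_or_ne name "index.tsx" with h4 | h4
  · subst h4; decide
  simp [h1, h2, h3, h4]

-- A's second loop is B's tsx slot, wrapped
theorem loopTsx_eq_findTsxB (files : List (List (String × String))) :
    loopTsx files = (findTsxB files).map (fun pc => tsxWrapper pc.1 pc.2) := by
  induction files with
  | nil => rfl
  | cons f rest ih =>
    simp only [loopTsx, findTsxB, tsx_pred_eq]
    split
    · rfl
    · simpa using ih

theorem or_if_none {α : Type} (c : Prop) [Decidable c] (v : α) (t : Option α) :
    (if c then some v else none).or t = if c then some v else t := by
  split <;> simp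

-- the fold computes, slot by slot, "current slot, else the first match in the rest"
set_option maxHeartbeats 1000000 in
theorem foldl_altStep (files : List (List (String × String)))
    (s1 : Option String) (s2 : Option (String × String)) (s3 : Option String)
    (s4 : Option (List (String × String))) :
    files.foldl altStep (s1, s2, s3, s4)
      = (s1.or (loopIndex files), s2.or (findTsxB files), s3.or (loopHtml files),
         s4.or files.head?) := by
  induction files generalizing s1 s2 s3 s4 with
  | nil => simp only [List.foldl_nil, loopIndex, findTsxB, loopHtml, List.head?_nil, Option.or_none]
  | cons f rest ih =>
    simp only [List.foldl_cons, altStep]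
    rw [ih]
    simp only [loopIndex, findTsxB, loopHtml, List.head?_cons]
    cases s1 <;> cases s2 <;> cases s3 <;> cases s4 <;>
      simp only [Option.some_or, Option.none_or, or_if_none]

theorem alt_eq (files : List (List (String × String))) :
    choose_preview_html_py_alt files = choose_preview_html_py files := by
  unfold choose_preview_html_py_alt choose_preview_html_py
  rw [foldl_altStep]
  simp only [Option.none_or, loopTsx_eq_findTsxB]
  cases loopIndex files with
  | some c => rfl
  | none =>
    cases findTsxB files with
    | some pc => rfl
    | none =>
      cases loopHtml files with
      | some c => rfl
      | none => cases files <;> rfl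

-- ===== VERDICT (by name: the statement is the Claim_ definition above) =====
theorem choose_preview_html_py_spec : Claim_equal_choose_preview_html_py := by
  intro files _
  unfold Spec_choose_preview_html_py
  exact (alt_eq files).symm
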